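-- pv_equiv track=rewrite | github.com/thiagodiasdigital/ache-sucatas-v13 | src/core/cloud_auditor_v15.py | encontrar_link_leiloeiro
-- ===== SOURCE A (Python) =====
-- from typing import Dict, List, Optional, Sequence, Tuple
--
-- KEYWORDS_LEILOEIRO = [
--     "leiloeiro", "leilao", "lance", "arrematacao", "superbid",
--     "sodresantoro", "zukerman", "joaoemilio", "leiloesfreire",
--     "megaleiloes", "sold", "leilomaster", "vipleiloes",
-- ]
--
-- def encontrar_link_leiloeiro(urls: Sequence[str], texto_completo: str = "") -> Optional[str]:
--     urls_unicas = list(dict.fromkeys([u for u in urls if u]))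
--
--     for url in urls_unicas:
--         url_lower = url.lower()
--         if any(keyword in url_lower for keyword in KEYWORDS_LEILOEIRO):
--             return url
--
--     for url in urls_unicas:
--         url_lower = url.lower()
--         if "gov" in url_lower or "pncp" in url_lower:
--             continue
--         if any(tld in url_lower for tld in [".com.br", ".com", ".net.br", ".net"]):
--             return url
--
--     return None
-- ===== SOURCE B (Python) =====
-- from typing import Optional, Sequence
--
-- KEYWORDS_LEILOEIRO = [
--     "leiloeiro", "leilao", "lance", "arrematacao", "superbid",
--     "sodresantoro", "zukerman", "joaoemilio", "leiloesfreire",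
--     "megaleiloes", "sold", "leilomaster", "vipleiloes",
-- ]
--
-- def encontrar_link_leiloeiro(urls: Sequence[str], texto_completo: str = "") -> Optional[str]:
--     # Single pass, no dedup pass needed: a keyword match returns at once (first
--     # occurrence wins, so duplicates are irrelevant); the first qualifying
--     # commercial URL is remembered as a fallback and only used after the scan.
--     fallback = None
--     for url in urls:
--         if not url:
--             continue
--         url_lower = url.lower()
--         if any(keyword in url_lower for keyword in KEYWORDS_LEILOEIRO):
--             return url
--         if fallback is None and "gov" not in url_lower and "pncp" not in url_lower \
--                 and (".com" in url_lower or ".net" in url_lower):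
--             fallback = url
--     return fallback
-- ===== Notes on version B (the rewrite author's own statement) =====
-- stated objective: simpler
-- what changed: A builds a deduplicated list and scans it twice (keywords first, then commercial TLDs); B makes one pass over the raw list, returning immediately on a keyword hit and remembering the first qualifying commercial URL as a fallback returned after the scan, with no dedup pass and the redundant .com.br/.net.br tests dropped.
import Mathlib
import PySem

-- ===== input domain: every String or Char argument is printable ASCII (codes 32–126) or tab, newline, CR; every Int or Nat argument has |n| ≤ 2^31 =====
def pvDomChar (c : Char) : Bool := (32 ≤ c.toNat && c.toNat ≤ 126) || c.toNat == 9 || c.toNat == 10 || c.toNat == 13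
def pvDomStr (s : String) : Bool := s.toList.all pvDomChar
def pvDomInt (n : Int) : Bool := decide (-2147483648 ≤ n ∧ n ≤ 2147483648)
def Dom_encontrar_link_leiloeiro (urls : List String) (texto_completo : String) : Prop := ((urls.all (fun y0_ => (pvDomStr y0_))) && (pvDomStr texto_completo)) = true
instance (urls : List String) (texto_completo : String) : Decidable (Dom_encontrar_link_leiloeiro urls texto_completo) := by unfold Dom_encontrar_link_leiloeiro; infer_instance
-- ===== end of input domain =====

-- B replaces A's dedup pass + two sequential scans by one fused pass over the raw
-- list: keyword matches return immediately, the first qualifying commercial URL is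
-- kept as a fallback and returned only after the scan (objective: simpler one-pass
-- decomposition with the same result).


-- ===== PORT A =====
-- As first for-loop: return url on a keyword hit
def KEYWORDS_LEILOEIRO : List String :=
  ["leiloeiro", "leilao", "lance", "arrematacao", "superbid",
   "sodresantoro", "zukerman", "joaoemilio", "leiloesfreire",
   "megaleiloes", "sold", "leilomaster", "vipleiloes"]
def pvALoop1 : List String → Option String
  | [] => none
  | url :: rest =>
    let url_lower := PySem.Str.lower url
    if KEYWORDS_LEILOEIRO.any (fun keyword => PySem.Str.isIn keyword url_lower) then some url
    else pvALoop1 rest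

-- As second for-loop: skip gov/pncp URLs, return url on a commercial-TLD hit
def pvALoop2 : List String → Option String
  | [] => none
  | url :: rest =>
    let url_lower := PySem.Str.lower url
    if PySem.Str.isIn "gov" url_lower || PySem.Str.isIn "pncp" url_lower then pvALoop2 rest
    else if [".com.br", ".com", ".net.br", ".net"].any (fun tld => PySem.Str.isIn tld url_lower) then some url
    else pvALoop2 rest

def encontrar_link_leiloeiro (urls : List String) (texto_completo : String) : Option String :=
  let urls_unicas := PySem.List.dedup (urls.filter (fun u => u != ""))
  match pvALoop1 urls_unicas with
  | some r => some r
  | none => pvALoop2 urls_unicas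


-- ===== PORT B =====
-- B's single loop: immediate return on a keyword hit, first commercial URL kept as fallback
def pvBLoop (fallback : Option String) : List String → Option String
  | [] => fallback
  | url :: rest =>
    if url == "" then pvBLoop fallback rest
    else
      let url_lower := PySem.Str.lower url
      if KEYWORDS_LEILOEIRO.any (fun keyword => PySem.Str.isIn keyword url_lower) then some url
      else if fallback.isNone && !PySem.Str.isIn "gov" url_lower && !PySem.Str.isIn "pncp" url_lower
              && (PySem.Str.isIn ".com" url_lower || PySem.Str.isIn ".net" url_lower) then
        pvBLoop (some url) rest
      else pvBLoop fallback rest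


def encontrar_link_leiloeiro_alt (urls : List String) (texto_completo : String) : Option String :=
  pvBLoop none urls


-- ===== PRECONDITION & SPEC =====
def Spec_encontrar_link_leiloeiro (urls : List String) (texto_completo : String) (out : Option String) : Prop := out = encontrar_link_leiloeiro_alt urls texto_completo
instance (urls : List String) (texto_completo : String) (out : Option String) : Decidable (Spec_encontrar_link_leiloeiro urls texto_completo out) := by unfold Spec_encontrar_link_leiloeiro; infer_instance

-- ===== CLAIM (what is proved, stated in full; the proofs are below) =====
def Claim_equal_encontrar_link_leiloeiro : Prop := ∀ (urls : List String) (texto_completo : String), Dom_encontrar_link_leiloeiro urls texto_completo → Spec_encontrar_link_leiloeiro urls texto_completo (encontrar_link_leiloeiro urls texto_completo)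

-- ===== LEMMAS AND PROOFS =====

-- the element-level predicates the two programs scan for
def pvKw (u : String) : Bool :=
  KEYWORDS_LEILOEIRO.any (fun keyword => PySem.Str.isIn keyword (PySem.Str.lower u))
def pvTldA (u : String) : Bool :=
  !(PySem.Str.isIn "gov" (PySem.Str.lower u) || PySem.Str.isIn "pncp" (PySem.Str.lower u)) &&
  [".com.br", ".com", ".net.br", ".net"].any (fun tld => PySem.Str.isIn tld (PySem.Str.lower u))
def pvTldB (u : String) : Bool :=
  !PySem.Str.isIn "gov" (PySem.Str.lower u) && !PySem.Str.isIn "pncp" (PySem.Str.lower u) &&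
  (PySem.Str.isIn ".com" (PySem.Str.lower u) || PySem.Str.isIn ".net" (PySem.Str.lower u))


theorem pvFind?_congr {α : Type} (P Q : α → Bool) (l : List α)
    (h : ∀ y ∈ l, P y = Q y) : List.find? P l = List.find? Q l := by
  induction l with
  | nil => rfl
  | cons x l ih =>
    have hx := h x (by simp)
    simp only [List.find?, hx]
    cases Q x <;> simp [ih (fun y hy => h y (by simp [hy]))]

theorem pvALoop1_eq (l : List String) : pvALoop1 l = List.find? pvKw l := by
  induction l with
  | nil => rfl
  | cons u l ih =>
    rw [List.find?]
    simp only [pvALoop1]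
    cases hk : pvKw u with
    | true => rw [if_pos (by rw [← pvKw]; exact hk)]
    | false => rw [if_neg (by rw [← pvKw, hk]; simp)]; exact ih

theorem pvALoop2_eq (l : List String) : pvALoop2 l = List.find? pvTldA l := by
  induction l with
  | nil => rfl
  | cons u l ih =>
    simp only [pvALoop2]
    cases hg : (PySem.Str.isIn "gov" (PySem.Str.lower u) || PySem.Str.isIn "pncp" (PySem.Str.lower u)) with
    | true =>
      rw [if_pos rfl, List.find?_cons_of_neg (by simp only [pvTldA, hg, Bool.not_true, Bool.false_and]; simp)]
      exact ih
    | false =>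
      rw [if_neg (by simp)]
      cases ht : ([".com.br", ".com", ".net.br", ".net"].any fun tld => PySem.Str.isIn tld (PySem.Str.lower u)) with
      | true => rw [if_pos rfl, List.find?_cons_of_pos (by simp only [pvTldA, hg, ht]; rfl)]
      | false =>
        rw [if_neg (by simp), List.find?_cons_of_neg (by simp only [pvTldA, ht, Bool.and_false]; simp)]
        exact ih

-- a prefix of the needle is found wherever the needle is: lets B test ".com"/".net" only
theorem pvIsIn_mono (sub sub' : String) (s : String)
    (hps : sub'.toList <+: sub.toList) (h : PySem.Str.isIn sub s = true) :
    PySem.Str.isIn sub' s = true := by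
  rw [PySem.Str.isIn_iff_infix] at h ⊢
  exact hps.isInfix.trans h


theorem pvTldA_eq_pvTldB (u : String) : pvTldA u = pvTldB u := by
  unfold pvTldA pvTldB
  cases hg : PySem.Str.isIn "gov" (PySem.Str.lower u) <;>
    cases hp : PySem.Str.isIn "pncp" (PySem.Str.lower u) <;>
      simp only [Bool.not_true, Bool.not_false, Bool.false_or, Bool.true_or, Bool.false_and,
        Bool.true_and, Bool.and_false]
  rw [Bool.eq_iff_iff]
  simp only [List.any_eq_true, List.mem_cons, List.not_mem_nil, or_false, Bool.or_eq_true]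
  constructor
  · rintro ⟨t, ht, hin⟩
    rcases ht with rfl | rfl | rfl | rfl
    · exact Or.inl (pvIsIn_mono ".com.br" ".com" _ (by decide) hin)
    · exact Or.inl hin
    · exact Or.inr (pvIsIn_mono ".net.br" ".net" _ (by decide) hin)
    · exact Or.inr hin
  · rintro (h | h)
    · exact ⟨".com", by simp, h⟩
    · exact ⟨".net", by simp, h⟩

-- deduplication does not change the first element satisfying a predicate
theorem pvFind?_foldl_add (p : String → Bool) (l : List String) : ∀ acc : List String,
    List.find? p (List.foldl PySem.Set.add acc l) =
      (List.find? p acc).or (List.find? (fun y => !acc.contains y && p y) l) := by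
  induction l with
  | nil => intro acc; simp
  | cons x l ih =>
    intro acc
    simp only [List.foldl_cons, PySem.Set.add, PySem.Set.contains]
    by_cases hc : acc.contains x = true
    · rw [if_pos hc, ih acc,
        List.find?_cons_of_neg (by simp only [hc, Bool.not_true, Bool.false_and]; simp)]
    · rw [if_neg hc, ih (acc ++ [x]), List.find?_append]
      rw [Bool.not_eq_true] at hc
      cases hp : p x with
      | true =>
        rw [List.find?_cons_of_pos (p := fun y => !acc.contains y && p y)
              (by simp only [hc, hp, Bool.not_false, Bool.true_and]),
          show List.find? p [x] = some x from by
            rw [List.find?_cons_of_pos hp],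
          Option.or_assoc]
        congr 1
      | false =>
        rw [List.find?_cons_of_neg (p := fun y => !acc.contains y && p y)
              (by simp only [hp, Bool.and_false]; simp),
          show List.find? p [x] = none from by
            rw [List.find?_cons_of_neg (by simp [hp])]; rfl,
          Option.or_none]
        congr 1
        apply pvFind?_congr
        intro y _
        by_cases hyx : y = x
        · subst hyx; simp [hp]
        · simp [hyx]


theorem pvFind?_dedup (p : String → Bool) (l : List String) :
    List.find? p (PySem.List.dedup l) = List.find? p l := by
  have h := pvFind?_foldl_add p l []
  simp only [List.contains_nil, Bool.not_false, Bool.true_and] at h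
  simpa [PySem.List.dedup, PySem.Set.ofList, PySem.Set.empty] using h

-- B's loop computes: first keyword hit, else the fallback, else first commercial hit
theorem pvBLoop_eq (l : List String) : ∀ f : Option String,
    pvBLoop f l =
      (List.find? (fun u => (u != "") && pvKw u) l).or
        (f.or (List.find? (fun u => (u != "") && pvTldB u) l)) := by
  induction l with
  | nil => intro f; simp [pvBLoop]
  | cons u l ih =>
    intro f
    simp only [pvBLoop]
    by_cases he : (u == "") = true
    · rw [if_pos he, ih f,
        List.find?_cons_of_neg (p := fun u => (u != "") && pvKw u)
          (by simp only [bne, he, Bool.not_true, Bool.false_and]; exact Bool.false_ne_true),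
        List.find?_cons_of_neg (p := fun u => (u != "") && pvTldB u)
          (by simp only [bne, he, Bool.not_true, Bool.false_and]; exact Bool.false_ne_true)]
    · rw [if_neg he, Bool.not_eq_true] at *
      have hne : (u != "") = true := by simp only [bne, he, Bool.not_false]
      by_cases hk : (KEYWORDS_LEILOEIRO.any fun keyword => PySem.Str.isIn keyword (PySem.Str.lower u)) = true
      · rw [if_pos hk,
          List.find?_cons_of_pos (p := fun u => (u != "") && pvKw u)
            (by simp only [pvKw, hne, hk, Bool.and_self])]
        rfl
      · rw [if_neg hk, Bool.not_eq_true] at *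
        have hkf : ((u != "") && pvKw u) = false := by
          simp only [pvKw, hk, Bool.and_false]
        rw [List.find?_cons_of_neg (p := fun u => (u != "") && pvKw u)
              (by simp only [hkf]; exact Bool.false_ne_true)]
        by_cases hc : (f.isNone && !PySem.Str.isIn "gov" (PySem.Str.lower u)
            && !PySem.Str.isIn "pncp" (PySem.Str.lower u)
            && (PySem.Str.isIn ".com" (PySem.Str.lower u) || PySem.Str.isIn ".net" (PySem.Str.lower u))) = true
        · have hf : f = none := by
            cases f with
            | none => rfl
            | some v => simp at hc
          subst hf
          have ht : ((u != "") && pvTldB u) = true := by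
            rw [hne, Bool.true_and, pvTldB]; exact hc
          rw [if_pos hc, ih (some u),
            List.find?_cons_of_pos (p := fun u => (u != "") && pvTldB u) ht]
          rfl
        · rw [if_neg hc, ih f]
          congr 1
          cases f with
          | some v => rfl
          | none =>
            rw [Bool.not_eq_true] at hc
            have ht : ((u != "") && pvTldB u) = false := by
              rw [hne, Bool.true_and, pvTldB]; exact hc
            rw [List.find?_cons_of_neg (p := fun u => (u != "") && pvTldB u)
                  (by simp only [ht]; exact Bool.false_ne_true)]


theorem pvFind?_filter (p q : String → Bool) (l : List String) :
    List.find? p (l.filter q) = List.find? (fun u => q u && p u) l := by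
  induction l with
  | nil => rfl
  | cons u l ih =>
    by_cases hq : q u = true
    · rw [List.filter_cons_of_pos hq]
      by_cases hp : p u = true
      · rw [List.find?_cons_of_pos hp, List.find?_cons_of_pos (by rw [hq, hp]; rfl)]
      · rw [List.find?_cons_of_neg hp, List.find?_cons_of_neg (by rw [Bool.not_eq_true] at hp; rw [hp, Bool.and_false]; simp), ih]
    · rw [List.filter_cons_of_neg hq, List.find?_cons_of_neg (by rw [Bool.not_eq_true] at hq; rw [hq]; simp), ih]

-- ===== VERDICT (by name: the statement is the Claim_ definition above) =====
theorem encontrar_link_leiloeiro_spec : Claim_equal_encontrar_link_leiloeiro := by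
  intro urls texto_completo _
  unfold Spec_encontrar_link_leiloeiro encontrar_link_leiloeiro encontrar_link_leiloeiro_alt
  rw [pvBLoop_eq]
  simp only [pvALoop1_eq, pvALoop2_eq, pvFind?_dedup, pvFind?_filter, Option.none_or]
  rw [pvFind?_congr (fun u => (u != "") && pvTldA u) (fun u => (u != "") && pvTldB u) urls
        (fun y _ => by simp only [pvTldA_eq_pvTldB])]
  cases List.find? (fun u => (u != "") && pvKw u) urls <;> rfl
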